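-- pv_equiv track=rewrite | github.com/sarahtwilliams412-bit/th3cl4w | tests/test_vla_model.py | _make_multi_object_ascii
-- ===== SOURCE A (Python) =====
-- def _make_multi_object_ascii(width=120, height=40) -> str:
--     """Create ASCII art with two separate dense regions."""
--     lines = []
--     for r in range(height):
--         row = []
--         for c in range(width):
--             # Object 1: (20,10) to (35,20)
--             if 20 <= c <= 35 and 10 <= r <= 20:
--                 row.append("@")
--             # Object 2: (80,25) to (100,35)
--             elif 80 <= c <= 100 and 25 <= r <= 35:
--                 row.append("#")
--             else:
--                 row.append(" ")
--         lines.append("".join(row))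
--     return "\n".join(lines)
-- ===== SOURCE B (Python) =====
-- def _make_multi_object_ascii(width=120, height=40) -> str:
--     """Create ASCII art with two separate dense regions (row-band construction)."""
--     def band(start, stop, ch):
--         # one row with ch filling columns [start, stop), clipped to the grid width
--         return " " * min(width, start) + ch * (min(width, stop) - start) + " " * (width - stop)
--
--     cache = {}
--
--     def row_for(r):
--         # classify the row, building each of the three row kinds at most once
--         kind = "@" if 10 <= r <= 20 else "#" if 25 <= r <= 35 else " "
--         if kind not in cache:
--             cache[kind] = (band(20, 36, "@") if kind == "@"      # object 1: columns 20..35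
--                            else band(80, 101, "#") if kind == "#"  # object 2: columns 80..100
--                            else " " * width)
--         return cache[kind]
--
--     return "\n".join(row_for(r) for r in range(height))
-- ===== Notes on version B (the rewrite author's own statement) =====
-- stated objective: faster
-- what changed: Replaces the per-cell nested loop with a row-band decomposition: the three possible row strings (object-1 band, object-2 band, blank) are each built once by string repetition from the clipped inclusive column bounds, and rows are selected by row index and joined.
import Mathlib
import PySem

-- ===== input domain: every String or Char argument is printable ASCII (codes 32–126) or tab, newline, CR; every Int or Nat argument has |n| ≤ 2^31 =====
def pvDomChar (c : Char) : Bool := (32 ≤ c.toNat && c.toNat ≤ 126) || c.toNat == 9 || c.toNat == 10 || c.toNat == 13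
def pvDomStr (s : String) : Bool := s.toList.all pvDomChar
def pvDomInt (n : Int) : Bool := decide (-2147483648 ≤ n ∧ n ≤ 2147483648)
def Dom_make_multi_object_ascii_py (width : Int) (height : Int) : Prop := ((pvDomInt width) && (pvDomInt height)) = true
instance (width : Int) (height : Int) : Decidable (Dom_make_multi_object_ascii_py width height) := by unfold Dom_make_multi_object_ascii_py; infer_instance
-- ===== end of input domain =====

-- B replaces A's per-cell nested loop by building each of the three possible row strings once
-- from the clipped column bounds and selecting a row per index (objective: faster, constant factor).

-- ===== PORT A =====
-- row is a List Char ("".join(row) of one-char strings = String.ofList row)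
def make_multi_object_ascii_py (width : Int) (height : Int) : String :=
  let lines := (PySem.List.pyRange 0 height 1).foldl (fun lines r =>
    let row := (PySem.List.pyRange 0 width 1).foldl (fun row c =>
      if 20 ≤ c ∧ c ≤ 35 ∧ 10 ≤ r ∧ r ≤ 20 then row ++ ['@']
      else if 80 ≤ c ∧ c ≤ 100 ∧ 25 ≤ r ∧ r ≤ 35 then row ++ ['#']
      else row ++ [' ']) []
    lines ++ [String.ofList row]) []
  PySem.Str.join "\n" lines

-- ===== PORT B =====
-- ' ' * n with possibly negative n is "" : Int.toNat clamps exactly so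
def pvBand (width start stop : Int) (ch : Char) : String :=
  String.ofList (List.replicate (min width start).toNat ' '
    ++ List.replicate (min width stop - start).toNat ch
    ++ List.replicate (width - stop).toNat ' ')

def make_multi_object_ascii_py_alt (width : Int) (height : Int) : String :=
  let rows := (PySem.List.pyRange 0 height 1).map (fun r =>
    if 10 ≤ r ∧ r ≤ 20 then pvBand width 20 36 '@'
    else if 25 ≤ r ∧ r ≤ 35 then pvBand width 80 101 '#'
    else String.ofList (List.replicate width.toNat ' '))
  PySem.Str.join "\n" rows

-- ===== PRECONDITION & SPEC =====
def Spec_make_multi_object_ascii_py (width : Int) (height : Int) (out : String) : Prop := out = make_multi_object_ascii_py_alt width height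
instance (width : Int) (height : Int) (out : String) : Decidable (Spec_make_multi_object_ascii_py width height out) := by unfold Spec_make_multi_object_ascii_py; infer_instance

-- ===== CLAIM (what is proved, stated in full; the proofs are below) =====
def Claim_equal_make_multi_object_ascii_py : Prop := ∀ (width : Int) (height : Int), Dom_make_multi_object_ascii_py width height → Spec_make_multi_object_ascii_py width height (make_multi_object_ascii_py width height)

-- ===== LEMMAS AND PROOFS =====

-- foldl that appends one mapped element per step is a map
theorem pv_foldl_push {α β : Type} (f : α → β) (l : List α) (init : List β) :
    l.foldl (fun acc x => acc ++ [f x]) init = init ++ l.map f := by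
  induction l generalizing init with
  | nil => simp
  | cons x xs ih => simp [List.foldl_cons, ih]

-- the three-segment shape of one band row, over List.range
theorem pv_map_range_band (n a b : Nat) (hab : a ≤ b) (y : Char) :
    (List.range n).map (fun k => if a ≤ k ∧ k < b then y else ' ') =
      List.replicate (min n a) ' ' ++ List.replicate (min n b - a) y
        ++ List.replicate (n - b) ' ' := by
  induction n with
  | zero => simp
  | succ n ih =>
    rw [List.range_succ, List.map_append, ih, List.map_singleton]
    by_cases h1 : n < a
    · have e1 : min (n+1) a = min n a + 1 := by omega
      have e2 : min (n+1) b - a = min n b - a := by omega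
      have e3 : n + 1 - b = n - b := by omega
      have : ¬ (a ≤ n ∧ n < b) := by omega
      rw [e1, e2, e3, if_neg this, List.replicate_succ']
      simp only [List.append_assoc]
      have h2 : min n b - a = 0 := by omega
      have h3 : n - b = 0 := by omega
      simp [h2, h3]
    · by_cases h2 : n < b
      · have e1 : min (n+1) a = min n a := by omega
        have e2 : min (n+1) b - a = (min n b - a) + 1 := by omega
        have e3 : n + 1 - b = n - b := by omega
        have : a ≤ n ∧ n < b := by omega
        rw [e1, e2, e3, if_pos this, List.replicate_succ']
        have h3 : n - b = 0 := by omega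
        simp [h3]
      · have e1 : min (n+1) a = min n a := by omega
        have e2 : min (n+1) b - a = min n b - a := by omega
        have e3 : n + 1 - b = (n - b) + 1 := by omega
        have : ¬ (a ≤ n ∧ n < b) := by omega
        rw [e1, e2, e3, if_neg this, List.replicate_succ']
        simp

theorem pv_band_eq (w : Int) (a b : Nat) (hab : a ≤ b) (y : Char) :
    pvBand w (a : Int) (b : Int) y =
      String.ofList ((List.range w.toNat).map (fun k => if a ≤ k ∧ k < b then y else ' ')) := by
  rw [pv_map_range_band _ _ _ hab]
  unfold pvBand
  have e1 : (min w (a:Int)).toNat = min w.toNat a := by omega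
  have e2 : (min w (b:Int) - (a:Int)).toNat = min w.toNat b - a := by omega
  have e3 : (w - (b:Int)).toNat = w.toNat - b := by omega
  rw [e1, e2, e3]

-- A's inner loop for one row equals B's selected row string
theorem pv_row_eq (w r : Int) :
    String.ofList ((PySem.List.pyRange 0 w 1).foldl (fun row c =>
      if 20 ≤ c ∧ c ≤ 35 ∧ 10 ≤ r ∧ r ≤ 20 then row ++ ['@']
      else if 80 ≤ c ∧ c ≤ 100 ∧ 25 ≤ r ∧ r ≤ 35 then row ++ ['#']
      else row ++ [' ']) []) =
    (if 10 ≤ r ∧ r ≤ 20 then pvBand w 20 36 '@'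
     else if 25 ≤ r ∧ r ≤ 35 then pvBand w 80 101 '#'
     else String.ofList (List.replicate w.toNat ' ')) := by
  have hfold : (PySem.List.pyRange 0 w 1).foldl (fun row c =>
      if 20 ≤ c ∧ c ≤ 35 ∧ 10 ≤ r ∧ r ≤ 20 then row ++ ['@']
      else if 80 ≤ c ∧ c ≤ 100 ∧ 25 ≤ r ∧ r ≤ 35 then row ++ ['#']
      else row ++ [' ']) [] =
      (PySem.List.pyRange 0 w 1).map (fun c =>
        if 20 ≤ c ∧ c ≤ 35 ∧ 10 ≤ r ∧ r ≤ 20 then '@'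
        else if 80 ≤ c ∧ c ≤ 100 ∧ 25 ≤ r ∧ r ≤ 35 then '#'
        else ' ') := by
    have hc := PySem.List.foldl_congr_mem (l := PySem.List.pyRange 0 w 1)
      (init := ([] : List Char))
      (f := fun row c =>
        if 20 ≤ c ∧ c ≤ 35 ∧ 10 ≤ r ∧ r ≤ 20 then row ++ ['@']
        else if 80 ≤ c ∧ c ≤ 100 ∧ 25 ≤ r ∧ r ≤ 35 then row ++ ['#'] else row ++ [' '])
      (g := fun row c =>
        row ++ [if 20 ≤ c ∧ c ≤ 35 ∧ 10 ≤ r ∧ r ≤ 20 then '@'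
          else if 80 ≤ c ∧ c ≤ 100 ∧ 25 ≤ r ∧ r ≤ 35 then '#' else ' '])
      (by intro acc c _; beta_reduce; split_ifs <;> rfl)
    rw [hc, pv_foldl_push]
    simp
  rw [hfold, PySem.List.pyRange_one]
  simp only [List.map_map, Int.sub_zero]
  by_cases h1 : 10 ≤ r ∧ r ≤ 20
  · rw [if_pos h1]
    have hb := pv_band_eq w 20 36 (by omega) '@'
    norm_num at hb
    rw [hb]
    congr 1
    apply List.map_congr_left
    intro k _
    simp only [Function.comp_apply, Int.zero_add]
    have c1 : (20 ≤ (k:Int) ∧ (k:Int) ≤ 35 ∧ 10 ≤ r ∧ r ≤ 20) ↔ (20 ≤ k ∧ k < 36) := by omega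
    have c2 : ¬ (25 ≤ r ∧ r ≤ 35) := by omega
    by_cases hk : 20 ≤ k ∧ k < 36
    · rw [if_pos (c1.mpr hk), if_pos hk]
    · rw [if_neg (fun h => hk (c1.mp h)), if_neg hk, if_neg (by omega)]
  · by_cases h2 : 25 ≤ r ∧ r ≤ 35
    · rw [if_neg h1, if_pos h2]
      have hb := pv_band_eq w 80 101 (by omega) '#'
      norm_num at hb
      rw [hb]
      congr 1
      apply List.map_congr_left
      intro k _
      simp only [Function.comp_apply, Int.zero_add]
      have c1 : (80 ≤ (k:Int) ∧ (k:Int) ≤ 100 ∧ 25 ≤ r ∧ r ≤ 35) ↔ (80 ≤ k ∧ k < 101) := by omega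
      by_cases hk : 80 ≤ k ∧ k < 101
      · rw [if_neg (by omega), if_pos (c1.mpr hk), if_pos hk]
      · rw [if_neg (by omega), if_neg (fun h => hk (c1.mp h)), if_neg hk]
    · rw [if_neg h1, if_neg h2]
      have : List.replicate w.toNat ' ' =
          (List.range w.toNat).map (fun k => if (0:Nat) ≤ k ∧ k < 0 then ' ' else ' ') := by
        rw [pv_map_range_band _ _ _ (le_refl 0)]
        simp
      rw [this]
      congr 1
      apply List.map_congr_left
      intro k _
      simp only [Function.comp_apply, Int.zero_add]
      rw [if_neg (by omega), if_neg (by omega), if_neg (by omega)]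

-- ===== VERDICT (by name: the statement is the Claim_ definition above) =====
theorem make_multi_object_ascii_py_spec : Claim_equal_make_multi_object_ascii_py := by
  intro width height _
  unfold Spec_make_multi_object_ascii_py make_multi_object_ascii_py make_multi_object_ascii_py_alt
  simp only
  congr 1
  rw [pv_foldl_push (fun r => String.ofList ((PySem.List.pyRange 0 width 1).foldl (fun row c =>
      if 20 ≤ c ∧ c ≤ 35 ∧ 10 ≤ r ∧ r ≤ 20 then row ++ ['@']
      else if 80 ≤ c ∧ c ≤ 100 ∧ 25 ≤ r ∧ r ≤ 35 then row ++ ['#']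
      else row ++ [' ']) []))]
  simp only [List.nil_append]
  apply List.map_congr_left
  intro r _
  exact pv_row_eq width r
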